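-- pv_equiv track=rewrite | github.com/TrueBurn/advent-of-code | 2024/day-9/solution.py | find_file_spans
-- ===== SOURCE A (Python) =====
-- def find_file_spans(disk):
--     spans = {}
--     curr_id = None
--     start = 0
--
--     for i, fid in enumerate(disk):
--         if fid != curr_id:
--             if curr_id is not None and curr_id != '.':
--                 if curr_id not in spans:
--                     spans[curr_id] = []
--                 spans[curr_id].append((start, i - start))
--             curr_id = fid
--             start = i
--
--     if curr_id is not None and curr_id != '.':
--         if curr_id not in spans:
--             spans[curr_id] = []
--         spans[curr_id].append((start, len(disk) - start))
--
--     return spans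
-- ===== SOURCE B (Python) =====
-- def _runs(idxs):
--     """Split a strictly increasing index list into (start, length) blocks of consecutive ints."""
--     if not idxs:
--         return []
--     length = 1
--     while length < len(idxs) and idxs[length] == idxs[0] + length:
--         length += 1
--     return [(idxs[0], length)] + _runs(idxs[length:])
--
--
-- def find_file_spans(disk):
--     positions = {}
--     for i, fid in enumerate(disk):
--         if fid != '.':
--             positions.setdefault(fid, []).append(i)
--     return {fid: _runs(idxs) for fid, idxs in positions.items()}
-- ===== Notes on version B (the rewrite author's own statement) =====
-- stated objective: alternative
-- what changed: Instead of a single-pass run-boundary state machine, B builds an inverted index mapping each file id to all of its positions and then splits each id's sorted index list into consecutive blocks to recover the (start, length) spans.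
import Mathlib
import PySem

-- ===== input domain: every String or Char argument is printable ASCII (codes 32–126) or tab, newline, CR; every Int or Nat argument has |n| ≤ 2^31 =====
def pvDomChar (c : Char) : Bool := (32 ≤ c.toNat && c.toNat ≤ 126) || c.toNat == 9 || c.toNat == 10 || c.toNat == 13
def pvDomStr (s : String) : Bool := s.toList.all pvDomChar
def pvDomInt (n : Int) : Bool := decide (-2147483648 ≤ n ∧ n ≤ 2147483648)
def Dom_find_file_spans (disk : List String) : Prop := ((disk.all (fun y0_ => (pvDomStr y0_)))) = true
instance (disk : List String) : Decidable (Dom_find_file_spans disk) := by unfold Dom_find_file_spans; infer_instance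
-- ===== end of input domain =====

-- B replaces A's single-pass run-boundary state machine by an inverted index
-- (file id ↦ its positions) whose per-id index lists are split into consecutive
-- blocks (objective: alternative).

-- ===== PORT A =====
-- `if curr_id not in spans: spans[curr_id] = []` then `spans[curr_id].append(t)`
def pvAddA (spans : PySem.Dict String (List (Int × Int))) (c : String) (t : Int × Int) :
    PySem.Dict String (List (Int × Int)) :=
  let spans := if spans.contains c then spans else spans.insert c []
  spans.modify c [] (fun l => l ++ [t])

-- the flush `if curr_id is not None and curr_id != '.': … append((start, e - start))`
def pvFlushA (spans : PySem.Dict String (List (Int × Int))) (curr : Option String)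
    (start e : Int) : PySem.Dict String (List (Int × Int)) :=
  match curr with
  | none => spans
  | some c => if c ≠ "." then pvAddA spans c (start, e - start) else spans

-- the `for i, fid in enumerate(disk)` loop over state (spans, curr_id, start)
def pvLoopA : List String → Int →
    PySem.Dict String (List (Int × Int)) × Option String × Int →
    PySem.Dict String (List (Int × Int)) × Option String × Int
  | [], _, st => st
  | fid :: rest, i, (spans, curr, start) =>
    if some fid ≠ curr then pvLoopA rest (i + 1) (pvFlushA spans curr start i, some fid, i)
    else pvLoopA rest (i + 1) (spans, curr, start)

def find_file_spans (disk : List String) : List (String × List (Int × Int)) :=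
  match pvLoopA disk 0 (PySem.Dict.empty, none, 0) with
  | (spans, curr, start) => (pvFlushA spans curr start (PySem.List.len disk)).items

-- ===== PORT B =====
-- the helper's `while length < len(idxs) and idxs[length] == idxs[0] + length` loop:
-- starting from expected value e = idxs[0]+1, it counts how far the consecutive chain
-- continues (it stops at the first mismatch, exactly like the while loop)
def pvChain (e : Int) : List Int → Nat
  | [] => 0
  | i :: rest => if i = e then 1 + pvChain (e + 1) rest else 0

-- _runs(idxs): `[(idxs[0], length)] + _runs(idxs[length:])` (empty list → [])
def pvRuns : List Int → List (Int × Int)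
  | [] => []
  | i0 :: rest =>
    (i0, ((1 + pvChain (i0 + 1) rest : Nat) : Int)) :: pvRuns (rest.drop (pvChain (i0 + 1) rest))
  termination_by l => l.length
  decreasing_by simp [List.length_drop]

-- the first loop: `positions.setdefault(fid, []).append(i)` for fid != '.'
def pvCollect (disk : List String) : PySem.Dict String (List Int) :=
  (PySem.List.enumerate disk).foldl
    (fun d p => if p.2 ≠ "." then (d.setdefault p.2 []).modify p.2 [] (fun l => l ++ [p.1]) else d)
    PySem.Dict.empty

-- the dict comprehension `{fid: _runs(idxs) for fid, idxs in positions.items()}`: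
-- keys of `positions` are distinct, so it is a map over the items in order
def find_file_spans_alt (disk : List String) : List (String × List (Int × Int)) :=
  (pvCollect disk).items.map (fun p => (p.1, pvRuns p.2))

-- ===== PRECONDITION & SPEC =====
def Spec_find_file_spans (disk : List String) (out : List (String × List (Int × Int))) : Prop := out = find_file_spans_alt disk
instance (disk : List String) (out : List (String × List (Int × Int))) : Decidable (Spec_find_file_spans disk out) := by unfold Spec_find_file_spans; infer_instance

-- ===== CLAIM (what is proved, stated in full; the proofs are below) =====
def Claim_equal_find_file_spans : Prop := ∀ (disk : List String), Dom_find_file_spans disk → Spec_find_file_spans disk (find_file_spans disk)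

-- ===== LEMMAS AND PROOFS =====

-- A's loop followed by its final flush at index i + l.length
def pvRunA (l : List String) (i : Int)
    (st : PySem.Dict String (List (Int × Int)) × Option String × Int) :
    PySem.Dict String (List (Int × Int)) :=
  pvFlushA (pvLoopA l i st).1 (pvLoopA l i st).2.1 (pvLoopA l i st).2.2 (i + l.length)

-- the runs of the disk with fid, start position and length
def pvKRuns : List String → Int → List (String × Int × Int)
  | [], _ => []
  | x :: xs, i =>
    (x, i, ((xs.takeWhile (· == x)).length + 1 : Int)) ::
      pvKRuns (xs.dropWhile (· == x)) (i + 1 + (xs.takeWhile (· == x)).length)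
  termination_by l => l.length
  decreasing_by simpa using Nat.lt_succ_of_le (List.length_dropWhile_le ..)

-- one non-'.'-filtered run processed by A's dict update
def pvStepK (d : PySem.Dict String (List (Int × Int))) (r : String × Int × Int) :
    PySem.Dict String (List (Int × Int)) :=
  if (r.1 != ".") = true then d.modify r.1 [] (fun l => l ++ [r.2]) else d

-- the positions of fid k in the disk, counting from i
def pvIdxsOf (k : String) : List String → Int → List Int
  | [], _ => []
  | x :: xs, i => if x = k then i :: pvIdxsOf k xs (i + 1) else pvIdxsOf k xs (i + 1)

-- the consecutive block i, i+1, …, i+m-1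
def pvConsec (i : Int) : Nat → List Int
  | 0 => []
  | m + 1 => i :: pvConsec (i + 1) m

-- A's runs, filtered and keyed: the pair stream A's dict is built from
def pvRunPairs (disk : List String) : List (String × Int × Int) :=
  (pvKRuns disk 0).filter (fun r => r.1 != ".")

-- B's index stream: the pair stream B's positions dict is built from
def pvIdxPairs (disk : List String) : List (String × Int) :=
  ((PySem.List.enumerate disk).filter (fun p => p.2 != ".")).map (fun p => (p.2, p.1))

lemma find_eq_runA (disk : List String) :
    find_file_spans disk = (pvRunA disk 0 (PySem.Dict.empty, none, 0)).items := by
  unfold find_file_spans pvRunA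
  rcases h : pvLoopA disk 0 (PySem.Dict.empty, none, 0) with ⟨sp, cu, st⟩
  simp [PySem.List.len_eq]

lemma get?_append_last {α : Type} (c : String) (v : List α) :
    ∀ (ps : List (String × List α)), (∀ p ∈ ps, (p.1 == c) = false) →
    (PySem.Dict.mk (ps ++ [(c, v)]) : PySem.Dict String (List α)).get? c = some v
  | [], _ => by simp [PySem.Dict.get?_mk_cons]
  | ⟨k, w⟩ :: rest, h => by
    have hp : (k == c) = false := h ⟨k, w⟩ (by simp)
    have ih := get?_append_last c v rest (fun q hq => h q (by simp [hq]))
    simpa [PySem.Dict.get?_mk_cons, hp] using ih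

-- modify on an absent key appends, so a preceding insert of the default is redundant
lemma mod_absent {α : Type} (d : PySem.Dict String (List α)) (c : String) (f : List α → List α)
    (h : d.contains c = false) :
    (d.insert c []).modify c [] f = d.modify c [] f := by
  have hmem : ∀ p ∈ d.items, (p.1 == c) = false := by
    intro p hp
    by_contra hne
    have : p.1 = c := by simpa using hne
    subst this
    have : d.contains p.1 = true := by
      rw [PySem.Dict.contains_iff_mem_keys]
      simp only [PySem.Dict.keys]
      exact List.mem_map_of_mem hp
    simp [this] at h
  apply PySem.Dict.ext
  simp only [PySem.Dict.modify, PySem.Dict.insert, h, Bool.false_eq_true, if_false]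
  have hc : (PySem.Dict.mk (d.items ++ [(c, [])]) : PySem.Dict String (List α)).contains c = true := by
    simp [PySem.Dict.contains_mk]
  have hg : (PySem.Dict.mk (d.items ++ [(c, [])]) : PySem.Dict String (List α)).getD c [] = [] := by
    simp [PySem.Dict.getD_eq_get?_getD, get?_append_last c [] d.items hmem]
  rw [PySem.Dict.getD_of_not_contains d [] h]
  simp only [hc, if_true, hg]
  simp only [List.map_append]
  rw [List.map_congr_left (fun p hp => by simp [hmem p hp] :
    ∀ p ∈ d.items, (if (p.1 == c) = true then (c, f []) else p) = p)]
  simp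

-- A's membership-test-then-append update is a plain modify
lemma pvAddA_eq_modify (d : PySem.Dict String (List (Int × Int))) (c : String) (t : Int × Int) :
    pvAddA d c t = d.modify c [] (fun l => l ++ [t]) := by
  unfold pvAddA
  by_cases h : d.contains c = true
  · simp [h]
  · simp only [h]
    exact mod_absent d c _ (by simpa using h)

-- B's setdefault-then-modify update is a plain modify
lemma pvSetdefault_modify {α : Type} (d : PySem.Dict String (List α)) (c : String)
    (f : List α → List α) :
    (d.setdefault c []).modify c [] f = d.modify c [] f := by
  by_cases h : d.contains c = true
  · rw [PySem.Dict.setdefault_of_contains d [] h]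
  · rw [PySem.Dict.setdefault_of_not_contains d [] (by simpa using h)]
    exact mod_absent d c f (by simpa using h)

-- one flush at the end of a run = one pvStepK
lemma pvFlush_step (spans : PySem.Dict String (List (Int × Int))) (x : String) (i : Int)
    (m : Nat) :
    pvFlushA spans (some x) i (i + 1 + m) = pvStepK spans (x, i, ((m : Int) + 1)) := by
  unfold pvFlushA pvStepK
  by_cases hx : x = "."
  · simp [hx]
  · have harith : i + 1 + (m : Int) - i = (m : Int) + 1 := by omega
    simp only [hx, ne_eq, not_false_eq_true, if_true, harith, pvAddA_eq_modify]
    simp [hx]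

-- elements equal to the current id are skipped by A's loop
lemma pvLoopA_skip (c : String) : ∀ (run : List String), (∀ x ∈ run, x = c) →
    ∀ (rest : List String) (i : Int) (spans : PySem.Dict String (List (Int × Int))) (s : Int),
    pvLoopA (run ++ rest) i (spans, some c, s) =
      pvLoopA rest (i + run.length) (spans, some c, s)
  | [], _, rest, i, spans, s => by simp
  | x :: run', h, rest, i, spans, s => by
    have hx : x = c := h x (by simp)
    subst hx
    have ih := pvLoopA_skip x run' (fun y hy => h y (by simp [hy])) rest (i + 1) spans s
    simp only [List.cons_append, pvLoopA, ne_eq, not_true_eq_false, if_false] at ih ⊢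
    rw [ih]
    congr 1
    simp only [List.length_cons]
    omega

-- main invariant: from a run boundary, A's loop+flush is the pvStepK fold over the runs
lemma pvMainK : ∀ (n : Nat) (l : List String), l.length ≤ n →
    ∀ (i : Int) (spans : PySem.Dict String (List (Int × Int))) (c : String) (s : Int),
    (∀ h, l.head? = some h → h ≠ c) →
    pvRunA l i (spans, some c, s) =
      (pvKRuns l i).foldl pvStepK (pvFlushA spans (some c) s i)
  | _, [], _, i, spans, c, s, _ => by
    simp [pvRunA, pvLoopA, pvKRuns]
  | 0, x :: xs, hlen, _, _, _, _, _ => by simp at hlen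
  | n + 1, x :: xs, hlen, i, spans, c, s, hhd => by
    have hxc : x ≠ c := hhd x rfl
    have hsplit : xs.takeWhile (· == x) ++ xs.dropWhile (· == x) = xs :=
      List.takeWhile_append_dropWhile
    set run := xs.takeWhile (· == x) with hrun
    set rest := xs.dropWhile (· == x) with hrest
    have hrunall : ∀ y ∈ run, y = x := fun y hy => by
      simpa using List.mem_takeWhile_imp hy
    have hresthd : ∀ h, rest.head? = some h → h ≠ x := by
      intro h hh
      have := List.head?_dropWhile_not (· == x) xs
      rw [← hrest, hh] at this
      simpa using this
    have hrl : rest.length ≤ n := by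
      have h1 : run.length + rest.length = xs.length := by
        rw [← hsplit]; simp
      simp only [List.length_cons] at hlen
      omega
    have step1 : pvRunA (x :: xs) i (spans, some c, s) =
        pvRunA rest (i + 1 + run.length) (pvFlushA spans (some c) s i, some x, i) := by
      unfold pvRunA
      conv_lhs => rw [pvLoopA, if_pos (by simpa using hxc)]
      conv_lhs => rw [← hsplit, pvLoopA_skip x run hrunall rest (i + 1) _ i]
      have harg : i + (((x :: (run ++ rest)).length : Nat) : Int) =
          i + 1 + (run.length : Int) + rest.length := by
        push_cast [List.length_cons, List.length_append]; ring
      rw [harg]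
    rw [step1, pvMainK n rest hrl (i + 1 + run.length) _ x i hresthd]
    rw [pvKRuns, List.foldl_cons, ← hrun, ← hrest, pvFlush_step]

-- the initial state (curr_id = None): no pending flush
lemma pvMainK0 (l : List String) (i : Int) (spans : PySem.Dict String (List (Int × Int)))
    (s : Int) :
    pvRunA l i (spans, none, s) = (pvKRuns l i).foldl pvStepK spans := by
  cases l with
  | nil => simp [pvRunA, pvLoopA, pvKRuns, pvFlushA]
  | cons x xs =>
    have hsplit : xs.takeWhile (· == x) ++ xs.dropWhile (· == x) = xs :=
      List.takeWhile_append_dropWhile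
    set run := xs.takeWhile (· == x) with hrun
    set rest := xs.dropWhile (· == x) with hrest
    have hrunall : ∀ y ∈ run, y = x := fun y hy => by
      simpa using List.mem_takeWhile_imp hy
    have hresthd : ∀ h, rest.head? = some h → h ≠ x := by
      intro h hh
      have := List.head?_dropWhile_not (· == x) xs
      rw [← hrest, hh] at this
      simpa using this
    have step1 : pvRunA (x :: xs) i (spans, none, s) =
        pvRunA rest (i + 1 + run.length) (spans, some x, i) := by
      unfold pvRunA
      conv_lhs => rw [pvLoopA, if_pos (by simp)]
      show pvFlushA (pvLoopA xs (i + 1) (pvFlushA spans none s i, some x, i)).1 _ _ _ = _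
      simp only [pvFlushA]
      conv_lhs => rw [← hsplit, pvLoopA_skip x run hrunall rest (i + 1) _ i]
      have harg : i + (((x :: (run ++ rest)).length : Nat) : Int) =
          i + 1 + (run.length : Int) + rest.length := by
        push_cast [List.length_cons, List.length_append]; ring
      rw [harg]
    rw [step1, pvMainK rest.length rest le_rfl (i + 1 + run.length) _ x i hresthd]
    rw [pvKRuns, List.foldl_cons, ← hrun, ← hrest, pvFlush_step]

-- A's result is the modify-fold over its filtered run stream
lemma findA_eq (disk : List String) :
    find_file_spans disk =
      ((pvRunPairs disk).foldl (fun d p => d.modify p.1 [] (fun l => l ++ [p.2]))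
        PySem.Dict.empty).items := by
  rw [find_eq_runA, pvMainK0]
  unfold pvRunPairs
  rw [List.foldl_filter]
  rfl

-- B's positions dict is the modify-fold over its index pair stream
lemma collect_eq (disk : List String) :
    pvCollect disk =
      (pvIdxPairs disk).foldl (fun d p => d.modify p.1 [] (fun l => l ++ [p.2]))
        PySem.Dict.empty := by
  unfold pvCollect pvIdxPairs
  rw [List.foldl_map, List.foldl_filter]
  have hf : (fun (d : PySem.Dict String (List Int)) (p : Int × String) =>
      if p.2 ≠ "." then (d.setdefault p.2 []).modify p.2 [] (fun l => l ++ [p.1]) else d) =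
      (fun d p => if (p.2 != ".") = true then d.modify p.2 [] (fun l => l ++ [p.1]) else d) := by
    funext d p
    by_cases h : p.2 = "."
    · simp [h]
    · simp [h, pvSetdefault_modify]
  rw [hf]

-- items of a modify-fold dict: first-occurrence keys paired with their value streams
lemma fold_items {β : Type} (pairs : List (String × β)) :
    ((pairs.foldl (fun d p => d.modify p.1 [] (fun l => l ++ [p.2]))
      PySem.Dict.empty).items) =
    (PySem.Set.ofList (pairs.map Prod.fst)).map
      (fun k => (k, (pairs.filter (fun p => p.1 == k)).map (fun p => p.2))) := by
  have hkeys := PySem.Dict.keys_foldl_modify_key pairs Prod.fst []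
    (fun _ p => fun l => l ++ [p.2]) PySem.Dict.empty
  have hnd : ((pairs.foldl (fun d p => d.modify p.1 [] (fun l => l ++ [p.2]))
      PySem.Dict.empty).keys).Nodup :=
    PySem.Dict.nodup_keys_foldl_modify_key pairs Prod.fst [] _ _ PySem.Dict.nodup_keys_empty
  rw [PySem.Dict.items_eq_map_keys _ hnd [], hkeys, PySem.Dict.keys_empty]
  apply List.map_congr_left
  intro k _
  have hg := PySem.Dict.getD_foldl_modify_append pairs PySem.Dict.empty k
  simp only [PySem.Dict.getD_empty, List.nil_append] at hg
  rw [hg]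

-- foldl add absorbs elements already present
lemma pvUpdate_absorb : ∀ (m : List String) (s : PySem.Set String), (∀ y ∈ m, y ∈ s) →
    m.foldl PySem.Set.add s = s
  | [], _, _ => rfl
  | y :: m', s, h => by
    have hy : s.add y = s := by
      simp [PySem.Set.add, PySem.Set.contains, h y (by simp)]
    rw [List.foldl_cons, hy]
    exact pvUpdate_absorb m' s (fun z hz => h z (by simp [hz]))

-- first-occurrence key set of the run fids = first-occurrence key set of the disk
lemma keys_collapse (q : String → Bool) : ∀ (n : Nat) (l : List String), l.length ≤ n →
    ∀ (i : Int) (s : PySem.Set String),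
    PySem.Set.update s (((pvKRuns l i).map Prod.fst).filter q) =
      PySem.Set.update s (l.filter q)
  | _, [], _, i, s => by simp [pvKRuns]
  | 0, x :: xs, hlen, _, _ => by simp at hlen
  | n + 1, x :: xs, hlen, i, s => by
    have hsplit : xs.takeWhile (· == x) ++ xs.dropWhile (· == x) = xs :=
      List.takeWhile_append_dropWhile
    set run := xs.takeWhile (· == x) with hrun
    set rest := xs.dropWhile (· == x) with hrest
    have hrunall : ∀ y ∈ run, y = x := fun y hy => by
      simpa using List.mem_takeWhile_imp hy
    have hrl : rest.length ≤ n := by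
      have h1 : run.length + rest.length = xs.length := by
        rw [← hsplit]; simp
      simp only [List.length_cons] at hlen
      omega
    rw [pvKRuns, ← hrun, ← hrest]
    have hxs : (x :: xs).filter q = (x :: (run ++ rest)).filter q := by rw [hsplit]
    rw [hxs]
    by_cases hq : q x
    · have hrunq : run.filter q = run := List.filter_eq_self.mpr (fun y hy => by
        rw [hrunall y hy]; exact hq)
      simp only [List.map_cons, List.filter_cons, hq, if_true, List.filter_append, hrunq]
      show PySem.Set.update (s.add x) _ = (run ++ rest.filter q).foldl PySem.Set.add (s.add x)
      rw [List.foldl_append]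
      rw [pvUpdate_absorb run (s.add x) (fun y hy => by
        rw [hrunall y hy]; exact (PySem.Set.mem_add s x x).mpr (Or.inr rfl))]
      exact keys_collapse q n rest hrl _ (s.add x)
    · have hrunq : run.filter q = [] := List.filter_eq_nil_iff.mpr (fun y hy => by
        rw [hrunall y hy]; simpa using hq)
      simp only [List.map_cons, List.filter_cons, hq, if_false, List.filter_append, hrunq,
        List.nil_append, Bool.false_eq_true]
      exact keys_collapse q n rest hrl _ s

lemma idx_map_fst (disk : List String) :
    (pvIdxPairs disk).map Prod.fst = disk.filter (fun y => y != ".") := by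
  unfold pvIdxPairs
  rw [List.map_map]
  conv_rhs => rw [← PySem.List.map_snd_enumerate disk 0, List.filter_map]
  rfl

lemma run_map_fst (disk : List String) :
    (pvRunPairs disk).map Prod.fst = ((pvKRuns disk 0).map Prod.fst).filter (fun y => y != ".") := by
  unfold pvRunPairs
  conv_rhs => rw [List.filter_map]
  rfl

-- the two dicts have the same keys, in the same order
lemma keys_eq (disk : List String) :
    PySem.Set.ofList ((pvRunPairs disk).map Prod.fst) =
      PySem.Set.ofList ((pvIdxPairs disk).map Prod.fst) := by
  rw [run_map_fst, idx_map_fst]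
  show PySem.Set.update [] _ = PySem.Set.update [] _
  exact keys_collapse (fun y => y != ".") disk.length disk le_rfl 0 []

-- ===== per-key lemmas =====

lemma pvIdxsOf_append (k : String) : ∀ (l1 l2 : List String) (i : Int),
    pvIdxsOf k (l1 ++ l2) i = pvIdxsOf k l1 i ++ pvIdxsOf k l2 (i + l1.length)
  | [], l2, i => by simp [pvIdxsOf]
  | x :: l1', l2, i => by
    have ih := pvIdxsOf_append k l1' l2 (i + 1)
    have harith : i + 1 + (l1'.length : Int) = i + ((l1'.length : Int) + 1) := by ring
    simp only [List.cons_append, pvIdxsOf, ih, harith, List.length_cons]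
    push_cast
    by_cases h : x = k <;> simp [h]

lemma pvIdxsOf_all_eq (k : String) : ∀ (l : List String) (i : Int), (∀ y ∈ l, y = k) →
    pvIdxsOf k l i = pvConsec i l.length
  | [], i, _ => rfl
  | x :: l', i, h => by
    have hx : x = k := h x (by simp)
    simp only [pvIdxsOf, hx, if_true, List.length_cons, pvConsec]
    exact congrArg _ (pvIdxsOf_all_eq k l' (i + 1) (fun y hy => h y (by simp [hy])))

lemma pvIdxsOf_all_ne (k : String) : ∀ (l : List String) (i : Int), (∀ y ∈ l, y ≠ k) →
    pvIdxsOf k l i = []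
  | [], i, _ => rfl
  | x :: l', i, h => by
    simp only [pvIdxsOf, h x (by simp), if_false]
    exact pvIdxsOf_all_ne k l' (i + 1) (fun y hy => h y (by simp [hy]))

lemma pvIdxsOf_lb (k : String) : ∀ (l : List String) (i : Int) (y : Int),
    y ∈ pvIdxsOf k l i → i ≤ y
  | [], i, y => by simp [pvIdxsOf]
  | x :: l', i, y => by
    intro hy
    simp only [pvIdxsOf] at hy
    by_cases h : x = k
    · rw [if_pos h] at hy
      rcases List.mem_cons.mp hy with h1 | h1
      · omega
      · have := pvIdxsOf_lb k l' (i + 1) y h1; omega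
    · rw [if_neg h] at hy
      have := pvIdxsOf_lb k l' (i + 1) y hy; omega

lemma pvChain_consec (t : List Int) : ∀ (m : Nat) (e : Int),
    pvChain e (pvConsec e m ++ t) = m + pvChain (e + m) t
  | 0, e => by simp [pvConsec]
  | m + 1, e => by
    have ih := pvChain_consec t m (e + 1)
    have harith : e + 1 + (m : Int) = e + ((m : Int) + 1) := by ring
    simp only [pvConsec, List.cons_append, pvChain, ih, harith]
    push_cast
    omega

lemma pvChain_zero (e : Int) (t : List Int) (h : ∀ y ∈ t, e < y) : pvChain e t = 0 := by
  cases t with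
  | nil => rfl
  | cons y t' =>
    have : y ≠ e := by have := h y (by simp); omega
    simp [pvChain, this]

lemma pvConsec_length : ∀ (m : Nat) (i : Int), (pvConsec i m).length = m
  | 0, _ => rfl
  | m + 1, i => by simp [pvConsec, pvConsec_length m]

-- the per-key core: splitting the index list of k into consecutive blocks gives k's runs
lemma pvCore : ∀ (n : Nat) (l : List String), l.length ≤ n → ∀ (k : String) (i : Int),
    pvRuns (pvIdxsOf k l i) =
      ((pvKRuns l i).filter (fun r => r.1 == k)).map (fun r => r.2)
  | _, [], _, k, i => by simp [pvIdxsOf, pvRuns, pvKRuns]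
  | 0, x :: xs, hlen, _, _ => by simp at hlen
  | n + 1, x :: xs, hlen, k, i => by
    have hsplit : xs.takeWhile (· == x) ++ xs.dropWhile (· == x) = xs :=
      List.takeWhile_append_dropWhile
    set run := xs.takeWhile (· == x) with hrun
    set rest := xs.dropWhile (· == x) with hrest
    have hrunall : ∀ y ∈ run, y = x := fun y hy => by
      simpa using List.mem_takeWhile_imp hy
    have hresthd : ∀ h, rest.head? = some h → h ≠ x := by
      intro h hh
      have := List.head?_dropWhile_not (· == x) xs
      rw [← hrest, hh] at this
      simpa using this
    have hrl : rest.length ≤ n := by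
      have h1 : run.length + rest.length = xs.length := by
        rw [← hsplit]; simp
      simp only [List.length_cons] at hlen
      omega
    have hidx : pvIdxsOf k (x :: xs) i =
        if x = k then i :: pvIdxsOf k xs (i + 1) else pvIdxsOf k xs (i + 1) := rfl
    rw [pvKRuns, ← hrun, ← hrest]
    have hxs : pvIdxsOf k xs (i + 1) =
        pvIdxsOf k run (i + 1) ++ pvIdxsOf k rest (i + 1 + run.length) := by
      conv_lhs => rw [← hsplit]
      rw [pvIdxsOf_append]
    by_cases hxk : x = k
    · subst hxk
      have hT : ∀ y ∈ pvIdxsOf x rest (i + 1 + (run.length : Int)),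
          i + 1 + (run.length : Int) < y := by
        intro y hy
        cases hr : rest with
        | nil => rw [hr] at hy; simp [pvIdxsOf] at hy
        | cons r rest' =>
          have hrx : r ≠ x := hresthd r (by rw [hr]; rfl)
          rw [hr] at hy
          simp only [pvIdxsOf, hrx, if_false] at hy
          have := pvIdxsOf_lb x rest' (i + 1 + (run.length : Int) + 1) y hy
          omega
      rw [hidx, if_pos rfl, hxs, pvIdxsOf_all_eq x run (i + 1) hrunall]
      rw [pvRuns]
      have hchain : pvChain (i + 1) (pvConsec (i + 1) run.length ++
          pvIdxsOf x rest (i + 1 + run.length)) = run.length := by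
        rw [pvChain_consec]
        rw [pvChain_zero _ _ (by intro y hy; exact hT y hy)]
        omega
      have hdrop : (pvConsec (i + 1) run.length ++
          pvIdxsOf x rest (i + 1 + run.length)).drop run.length =
          pvIdxsOf x rest (i + 1 + run.length) := by
        have hd := List.drop_left (l₁ := pvConsec (i + 1) run.length)
          (l₂ := pvIdxsOf x rest (i + 1 + (run.length : Int)))
        rwa [pvConsec_length] at hd
      rw [hchain, hdrop]
      rw [List.filter_cons, if_pos (by simp), List.map_cons]
      refine congrArg₂ _ (by push_cast; ring_nf) ?_
      exact pvCore n rest hrl x (i + 1 + run.length)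
    · rw [hidx, if_neg hxk, hxs, pvIdxsOf_all_ne k run (i + 1)
        (fun y hy => by rw [hrunall y hy]; exact hxk), List.nil_append]
      rw [List.filter_cons, if_neg (by simpa using hxk)]
      exact pvCore n rest hrl k (i + 1 + run.length)

-- B's per-key index stream is pvIdxsOf
lemma enum_filter_map (k : String) : ∀ (l : List String) (s : Int),
    ((PySem.List.enumerate l s).filter (fun p => p.2 == k)).map (fun p => p.1) =
      pvIdxsOf k l s
  | [], s => by simp [pvIdxsOf]
  | x :: l', s => by
    have ih := enum_filter_map k l' (s + 1)
    rw [PySem.List.enumerate_cons, List.filter_cons]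
    by_cases h : x = k
    · subst h
      simp [pvIdxsOf, ih]
    · simp [pvIdxsOf, h, ih]

-- B's per-key index stream is pvIdxsOf
lemma idx_values (disk : List String) (k : String) (hk : k ≠ ".") :
    ((pvIdxPairs disk).filter (fun p => p.1 == k)).map (fun p => p.2) =
      pvIdxsOf k disk 0 := by
  unfold pvIdxPairs
  rw [List.filter_map, List.map_map]
  have h1 : ((fun (p : String × Int) => p.1 == k) ∘ fun (p : Int × String) => (p.2, p.1)) =
      (fun (p : Int × String) => p.2 == k) := by funext p; rfl
  have h2 : ((fun (p : String × Int) => p.2) ∘ fun (p : Int × String) => (p.2, p.1)) =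
      (fun (p : Int × String) => p.1) := by funext p; rfl
  rw [h1, h2, List.filter_filter]
  have h3 : ∀ p ∈ PySem.List.enumerate disk 0,
      ((p.2 == k) && (p.2 != ".")) = (p.2 == k) := by
    intro p _
    by_cases h : p.2 = k
    · simp [h, hk]
    · simp [h]
  rw [List.filter_congr h3]
  exact enum_filter_map k disk 0

-- A's per-key value stream drops the '.'-filter once keyed
lemma run_values (disk : List String) (k : String) (hk : k ≠ ".") :
    ((pvRunPairs disk).filter (fun p => p.1 == k)).map (fun p => p.2) =
      ((pvKRuns disk 0).filter (fun r => r.1 == k)).map (fun r => r.2) := by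
  unfold pvRunPairs
  rw [List.filter_filter]
  have h3 : ∀ r ∈ pvKRuns disk 0, ((r.1 == k) && (r.1 != ".")) = (r.1 == k) := by
    intro r _
    by_cases h : r.1 = k
    · simp [h, hk]
    · simp [h]
  rw [List.filter_congr h3]


-- ===== VERDICT (by name: the statement is the Claim_ definition above) =====
theorem find_file_spans_spec : Claim_equal_find_file_spans := by
  intro disk _
  show find_file_spans disk = find_file_spans_alt disk
  unfold find_file_spans_alt
  rw [findA_eq, collect_eq, fold_items, fold_items, List.map_map, keys_eq]
  apply List.map_congr_left
  intro k hk
  have hk' : k ≠ "." := by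
    rw [idx_map_fst] at hk
    have := (PySem.Set.mem_ofList _ _).mp hk
    have := List.of_mem_filter this
    simpa using this
  simp only [Function.comp]
  rw [run_values disk k hk', idx_values disk k hk',
    pvCore disk.length disk le_rfl k 0]
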